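-- pv_equiv track=rewrite | github.com/mursis/wordfinder | word_filter.py | find_matching_words
-- ===== SOURCE A (Python) =====
-- from collections import Counter
--
-- def matches_pattern(word, pattern):
--     if len(word) != len(pattern):
--         return False
--     for w_c, p_c in zip(word, pattern):
--         if p_c != '_' and w_c != p_c:
--             return False
--     return True
--
-- def find_matching_words(letters, pattern, wordlist):
--     letters = letters.lower()
--     pattern = pattern.lower()
--     letters_count = Counter(letters)
--
--     result = []
--     for word in wordlist:
--         if not matches_pattern(word, pattern):
--             continue
--         word_count = Counter(word)
--         if all(word_count[c] <= letters_count.get(c, 0) for c in word):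
--             result.append(word)
--     return result
-- ===== SOURCE B (Python) =====
-- def _consume(avail, word):
--     # Greedily take each needed letter out of the available pool.
--     for ch in word:
--         if ch in avail:
--             avail.remove(ch)
--         else:
--             return False
--     return True
--
-- def find_matching_words(letters, pattern, wordlist):
--     pat = pattern.lower()
--     n = len(pat)
--     # Fixed-position constraints compiled once from the pattern.
--     constraints = [(i, c) for i, c in enumerate(pat) if c != '_']
--     pool = list(letters.lower())
--     result = []
--     for word in wordlist:
--         if len(word) != n:
--             continue
--         if any(word[i] != c for i, c in constraints):
--             continue
--         if _consume(list(pool), word):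
--             result.append(word)
--     return result
-- ===== Notes on version B (the rewrite author's own statement) =====
-- stated objective: alternative
-- what changed: Replaced the per-word Counter multiset comparison with a greedy consume that removes each needed letter from a copy of the letter pool, and replaced the per-word zip pattern scan with fixed-position constraints compiled once from the pattern.
import Mathlib
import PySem

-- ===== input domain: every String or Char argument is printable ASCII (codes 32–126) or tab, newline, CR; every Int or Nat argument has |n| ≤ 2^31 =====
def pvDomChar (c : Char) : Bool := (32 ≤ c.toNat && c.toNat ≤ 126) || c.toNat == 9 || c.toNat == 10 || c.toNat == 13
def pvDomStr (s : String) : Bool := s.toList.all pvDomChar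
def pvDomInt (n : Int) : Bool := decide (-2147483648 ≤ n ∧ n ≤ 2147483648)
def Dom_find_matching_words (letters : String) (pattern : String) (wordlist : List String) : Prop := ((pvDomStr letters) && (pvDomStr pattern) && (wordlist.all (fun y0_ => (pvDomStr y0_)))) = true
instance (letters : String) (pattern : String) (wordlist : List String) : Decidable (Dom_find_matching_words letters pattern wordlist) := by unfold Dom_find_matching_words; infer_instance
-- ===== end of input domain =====

-- B replaces A's per-word Counter multiset comparison with greedy removal from a copy of the
-- letter pool and pre-compiles the pattern's fixed-position constraints once (objective: alternative).

-- ===== PORT A =====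
def matches_pattern (word pattern : List Char) : Bool :=
  if word.length ≠ pattern.length then false
  else (word.zip pattern).all (fun wp => !(wp.2 != '_' && wp.1 != wp.2))

def find_matching_words (letters : String) (pattern : String) (wordlist : List String) : List String :=
  let letters := PySem.Str.lower letters
  let pattern := PySem.Str.lower pattern
  let letters_count := PySem.Dict.counter letters.toList
  wordlist.foldl (fun result word =>
    if !matches_pattern word.toList pattern.toList then result
    else
      let word_count := PySem.Dict.counter word.toList
      if word.toList.all (fun c => decide (word_count.getD c 0 ≤ letters_count.getD c 0)) then
        result ++ [word]
      else result) []

-- ===== PORT B =====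
def consume : List Char → List Char → Bool
  | _, [] => true
  | avail, c :: cs => if avail.contains c then consume (avail.erase c) cs else false

def find_matching_words_alt (letters : String) (pattern : String) (wordlist : List String) : List String :=
  let pat := (PySem.Str.lower pattern).toList
  let n := pat.length
  let constraints := (PySem.List.enumerate pat).filter (fun p => p.2 != '_')
  let pool := (PySem.Str.lower letters).toList
  wordlist.foldl (fun result word =>
    if word.toList.length ≠ n then result
    else if constraints.any (fun p => PySem.List.pyGetD word.toList p.1 ' ' != p.2) then result
    else if consume pool word.toList then result ++ [word]
    else result) []

-- ===== PRECONDITION & SPEC =====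
def Spec_find_matching_words (letters : String) (pattern : String) (wordlist : List String) (out : List String) : Prop := out = find_matching_words_alt letters pattern wordlist
instance (letters : String) (pattern : String) (wordlist : List String) (out : List String) : Decidable (Spec_find_matching_words letters pattern wordlist out) := by unfold Spec_find_matching_words; infer_instance

-- ===== CLAIM (what is proved, stated in full; the proofs are below) =====
def Claim_equal_find_matching_words : Prop := ∀ (letters : String) (pattern : String) (wordlist : List String), Dom_find_matching_words letters pattern wordlist → Spec_find_matching_words letters pattern wordlist (find_matching_words letters pattern wordlist)

-- ===== LEMMAS AND PROOFS =====

-- greedy removal succeeds iff every needed letter is available often enough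
lemma consume_iff (avail word : List Char) :
    consume avail word = true ↔ ∀ c ∈ word, word.count c ≤ avail.count c := by
  induction word generalizing avail with
  | nil => simp [consume]
  | cons c cs ih =>
    simp only [consume]
    by_cases hc : avail.contains c
    · have hmem : c ∈ avail := by simpa using hc
      rw [if_pos hc, ih]
      constructor
      · intro h d hd
        rcases List.mem_cons.mp hd with h1 | h1
        · subst h1
          have h1c : 1 ≤ avail.count d := List.count_pos_iff.mpr hmem
          by_cases hdc : d ∈ cs
          · have := h d hdc
            rw [List.count_erase_self] at this
            simp only [List.count_cons_self]
            omega
          · simp only [List.count_cons_self, List.count_eq_zero.mpr hdc]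
            omega
        · by_cases hdc : d = c
          · subst hdc
            have := h d h1
            rw [List.count_erase_self] at this
            have h1c : 1 ≤ avail.count d := List.count_pos_iff.mpr hmem
            simp only [List.count_cons_self]
            omega
          · have := h d h1
            rw [List.count_erase_of_ne hdc] at this
            rw [List.count_cons_of_ne (Ne.symm hdc)]
            exact this
      · intro h d hd
        by_cases hdc : d = c
        · subst hdc
          have := h d (List.mem_cons_self)
          rw [List.count_cons_self] at this
          rw [List.count_erase_self]
          omega
        · have := h d (List.mem_cons_of_mem _ hd)
          rw [List.count_cons_of_ne (Ne.symm hdc)] at this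
          rw [List.count_erase_of_ne hdc]
          exact this
    · rw [if_neg hc]
      constructor
      · intro h
        simp at h
      · intro h
        have hnot : c ∉ avail := by simpa using hc
        have := h c List.mem_cons_self
        rw [List.count_eq_zero.mpr hnot, List.count_cons_self] at this
        omega

-- A's per-word availability test equals B's greedy consume
lemma avail_eq (pool word : List Char) :
    (word.all (fun c =>
      decide ((PySem.Dict.counter word).getD c 0 ≤ (PySem.Dict.counter pool).getD c 0)))
      = consume pool word := by
  rw [Bool.eq_iff_iff, consume_iff, List.all_eq_true]
  constructor
  · intro h c hc
    have := h c hc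
    simp only [PySem.Dict.getD_counter, decide_eq_true_eq] at this
    exact_mod_cast this
  · intro h c hc
    have := h c hc
    simp only [PySem.Dict.getD_counter, decide_eq_true_eq]
    exact_mod_cast this

-- A's pattern loop equals B's compiled fixed-position constraints
lemma pattern_eq (word pat : List Char) :
    matches_pattern word pat =
      (!decide (word.length ≠ pat.length) &&
       !(((PySem.List.enumerate pat).filter (fun p => p.2 != '_')).any
          (fun p => PySem.List.pyGetD word p.1 ' ' != p.2))) := by
  by_cases hlen : word.length = pat.length
  · simp only [matches_pattern, hlen, ne_eq, not_true_eq_false, decide_false,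
      Bool.not_false, Bool.true_and, if_false]
    rw [Bool.eq_iff_iff, List.all_eq_true, Bool.not_eq_true', List.any_eq_false]
    constructor
    · intro h p hp
      rw [List.mem_filter] at hp
      obtain ⟨hpe, hne⟩ := hp
      rw [PySem.List.mem_enumerate_iff] at hpe
      obtain ⟨k, hk, rfl⟩ := hpe
      have hkw : k < word.length := by omega
      have hzip : (word[k], pat[k]) ∈ word.zip pat := by
        have hkz : k < (word.zip pat).length := by
          rw [List.length_zip]; omega
        have hm := List.getElem_mem hkz
        rwa [List.getElem_zip] at hm
      have hb := h _ hzip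
      have hne' : pat[k] ≠ '_' := by simpa using hne
      have hw : word[k] = pat[k] := by
        by_contra hne2
        simp [hne', hne2] at hb
      simp only [zero_add, PySem.List.pyGetD_natCast]
      rw [List.getD_eq_getElem _ _ hkw, hw]
      simp
    · intro h wp hwp
      obtain ⟨k, hk, he⟩ := List.mem_iff_getElem.mp hwp
      rw [List.length_zip] at hk
      have hkp : k < pat.length := by omega
      have hkw : k < word.length := by omega
      rw [List.getElem_zip] at he
      subst he
      by_cases hus : pat[k] = '_'
      · simp [hus]
      · have hmemf : ((0 : Int) + (k : Int), pat[k]) ∈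
            (PySem.List.enumerate pat).filter (fun p => p.2 != '_') := by
          rw [List.mem_filter]
          refine ⟨?_, by simpa using hus⟩
          rw [PySem.List.mem_enumerate_iff]
          exact ⟨k, hkp, rfl⟩
        have hb := h _ hmemf
        simp only [zero_add, PySem.List.pyGetD_natCast] at hb
        rw [List.getD_eq_getElem _ _ hkw] at hb
        have hw : word[k] = pat[k] := by simpa using hb
        simp [hw]
  · simp [matches_pattern, hlen]

lemma pv_foldl_ext {α β : Type} (f g : β → α → β) (init : β) (l : List α)
    (h : ∀ b a, f b a = g b a) : l.foldl f init = l.foldl g init := by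
  have hfg : f = g := funext fun b => funext fun a => h b a
  rw [hfg]

-- ===== VERDICT (by name: the statement is the Claim_ definition above) =====
theorem find_matching_words_spec : Claim_equal_find_matching_words := by
  intro letters pattern wordlist _
  unfold Spec_find_matching_words find_matching_words find_matching_words_alt
  dsimp only
  refine pv_foldl_ext _ _ _ _ ?_
  intro result word
  rw [pattern_eq]
  by_cases hlen : word.toList.length = (PySem.Str.lower pattern).toList.length
  · simp only [hlen, ne_eq, not_true_eq_false, decide_false, Bool.not_false, Bool.true_and,
      if_false]
    by_cases hany : ((PySem.List.enumerate (PySem.Str.lower pattern).toList).filter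
        (fun p => p.2 != '_')).any
        (fun p => PySem.List.pyGetD word.toList p.1 ' ' != p.2) = true
    · rw [Bool.not_not, if_pos hany, if_pos hany]
    · rw [Bool.not_not, if_neg hany, if_neg hany, avail_eq]
  · have hd : (decide ¬word.toList.length = (PySem.Str.lower pattern).toList.length) = true :=
      decide_eq_true hlen
    rw [if_pos hlen, hd, Bool.not_true, Bool.false_and, Bool.not_false, if_pos rfl]
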